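-- pv_equiv track=rewrite | github.com/Leapense/problems | 1411번: 비슷한 단어/비슷한 단어.py | get_canonical
-- ===== SOURCE A (Python) =====
-- def get_canonical(word):
--     mapping = {}
--     pattern = []
--     next_num = 0
--     for ch in word:
--         if ch not in mapping:
--             mapping[ch] = next_num
--             next_num += 1
--         pattern.append(mapping[ch])
--     return tuple(pattern)
-- ===== SOURCE B (Python) =====
-- def get_canonical(word):
--     # rank of ch = number of distinct characters in the prefix of word
--     # ending at ch's first occurrence, minus 1 (no mapping table needed)
--     return tuple(len(set(word[:word.index(ch) + 1])) - 1 for ch in word)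
-- ===== Notes on version B (the rewrite author's own statement) =====
-- stated objective: simpler
-- what changed: A runs one stateful pass maintaining a char->rank dict and a counter; B drops the mapping table entirely and computes each character's rank by a closed form: the number of distinct characters in the prefix of word ending at that character's first occurrence, minus 1.
import Mathlib
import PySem

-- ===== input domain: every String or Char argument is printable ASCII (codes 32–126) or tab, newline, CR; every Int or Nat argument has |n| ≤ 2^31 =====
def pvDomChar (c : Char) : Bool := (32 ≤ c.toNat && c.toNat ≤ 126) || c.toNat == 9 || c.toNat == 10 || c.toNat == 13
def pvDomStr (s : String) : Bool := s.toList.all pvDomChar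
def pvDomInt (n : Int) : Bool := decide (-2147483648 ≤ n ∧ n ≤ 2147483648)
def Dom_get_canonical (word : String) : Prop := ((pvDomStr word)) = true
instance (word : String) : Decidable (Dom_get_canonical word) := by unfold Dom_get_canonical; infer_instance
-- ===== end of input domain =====

-- B drops A's dict/counter loop: each rank is the closed form "distinct chars in the prefix ending at the first occurrence, minus 1" (objective: simpler).


-- ===== PORT A =====
-- one pass: mapping dict, pattern list, next_num counter.
-- mapping[ch] after the if is always present, so getD 0 is exact (the default is never used).
def pvStepA (s : PySem.Dict Char Int × List Int × Int) (ch : Char) :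
    PySem.Dict Char Int × List Int × Int :=
  let mapping := s.1
  let pattern := s.2.1
  let next_num := s.2.2
  if mapping.contains ch then
    (mapping, pattern ++ [mapping.getD ch 0], next_num)
  else
    let mapping' := mapping.insert ch next_num
    (mapping', pattern ++ [mapping'.getD ch 0], next_num + 1)

def get_canonical (word : String) : List Int :=
  (word.toList.foldl pvStepA (PySem.Dict.empty, [], 0)).2.1

-- ===== PORT B =====
-- per character: len(set(word[:word.index(ch)+1])) - 1.
-- word.index(ch) never raises here since ch is drawn from word, so getD 0 is exact.
def get_canonical_alt (word : String) : List Int :=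
  word.toList.map (fun ch =>
    ((PySem.Set.len (PySem.Set.ofList
        (PySem.List.slice word.toList none
          (some ((((PySem.List.index? word.toList ch).getD 0 : Nat) : Int) + 1)))) : Int) - 1))

-- ===== PRECONDITION & SPEC =====
def Spec_get_canonical (word : String) (out : List Int) : Prop := out = get_canonical_alt word
instance (word : String) (out : List Int) : Decidable (Spec_get_canonical word out) := by unfold Spec_get_canonical; infer_instance

-- ===== CLAIM (what is proved, stated in full; the proofs are below) =====
def Claim_equal_get_canonical : Prop := ∀ (word : String), Dom_get_canonical word → Spec_get_canonical word (get_canonical word)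

-- ===== LEMMAS AND PROOFS =====

-- once a character is present in the set, appending more elements does not move its first-occurrence index
theorem pv_index?_update_of_mem {u : List Char} {c : Char} (l : List Char) (hc : c ∈ u) :
    PySem.List.index? (PySem.Set.update u l) c = PySem.List.index? u c := by
  induction l generalizing u with
  | nil => rfl
  | cons x l ih =>
    show PySem.List.index? (PySem.Set.update (PySem.Set.add u x) l) c = _
    rw [ih (u := PySem.Set.add u x) (by simp [PySem.Set.add]; split <;> simp [hc])]
    unfold PySem.Set.add
    split
    · rfl
    · rw [PySem.List.index?_append_of_mem _ hc]

theorem pv_index?_getD_append {u : List Char} {c c' : Char} (hne : c' ≠ c) :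
    ((PySem.List.index? (u ++ [c]) c').getD 0 : Nat) = ((PySem.List.index? u c').getD 0 : Nat) := by
  by_cases h : c' ∈ u
  · rw [PySem.List.index?_append_of_mem _ h]
  · rw [(PySem.List.index?_eq_none_iff _ _).mpr h,
        (PySem.List.index?_eq_none_iff _ _).mpr (by simp [hne, h])]

-- loop invariant for A: the dict is the rank table of the distinct-prefix built so far
theorem pv_loop (l : List Char) (d : PySem.Dict Char Int) (p : List Int) (u : List Char)
    (hco : ∀ c, d.contains c = decide (c ∈ u))
    (hget : ∀ c, d.getD c 0 = (((PySem.List.index? u c).getD 0 : Nat) : Int)) :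
    (l.foldl pvStepA (d, p, (u.length : Int))).2.1 =
      p ++ l.map (fun c => (((PySem.List.index? (PySem.Set.update u l) c).getD 0 : Nat) : Int)) := by
  induction l generalizing d p u with
  | nil => simp
  | cons c l ih =>
    rw [List.foldl_cons]
    by_cases hmem : c ∈ u
    · have hstep : pvStepA (d, p, (u.length : Int)) c =
          (d, p ++ [d.getD c 0], (u.length : Int)) := by
        unfold pvStepA
        simp only
        rw [if_pos (by rw [hco c]; simpa using hmem)]
      rw [hstep, ih d (p ++ [d.getD c 0]) u hco hget]
      have hadd : PySem.Set.add u c = u := by simp [PySem.Set.add, hmem]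
      have hupd : PySem.Set.update u (c :: l) = PySem.Set.update u l := by
        show PySem.Set.update (PySem.Set.add u c) l = _
        rw [hadd]
      rw [List.map_cons, hupd]
      have hidx : PySem.List.index? (PySem.Set.update u l) c = PySem.List.index? u c := by
        apply pv_index?_update_of_mem _ hmem
      rw [hget c, hidx]
      simp
    · have hstep : pvStepA (d, p, (u.length : Int)) c =
          (d.insert c (u.length : Int),
           p ++ [(d.insert c (u.length : Int)).getD c 0],
           (((u ++ [c]).length : Nat) : Int)) := by
        unfold pvStepA
        simp only
        rw [if_neg (by rw [hco c]; simpa using hmem)]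
        simp
      rw [hstep, ih (d.insert c (u.length : Int)) _ (u ++ [c])
        (fun c' => by
          rw [PySem.Dict.contains_insert, hco c']
          by_cases h : c' = c <;> simp [h])
        (fun c' => by
          rw [PySem.Dict.getD_insert]
          by_cases h : c' = c
          · subst h
            rw [if_pos rfl, PySem.List.index?_append_singleton_self u c' hmem]
            simp
          · rw [if_neg h, hget c', pv_index?_getD_append h])]
      have hadd : PySem.Set.add u c = u ++ [c] := by simp [PySem.Set.add, hmem]
      have hupd : PySem.Set.update u (c :: l) = PySem.Set.update (u ++ [c]) l := by
        show PySem.Set.update (PySem.Set.add u c) l = _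
        rw [hadd]
      rw [List.map_cons, hupd]
      have hidx : PySem.List.index? (PySem.Set.update (u ++ [c]) l) c = some u.length := by
        rw [pv_index?_update_of_mem _ (by simp),
            PySem.List.index?_append_singleton_self u c hmem]
      rw [PySem.Dict.getD_insert_self, hidx]
      simp

-- Set.ofList distributes over append as an update
theorem pv_ofList_append (xs ys : List Char) :
    PySem.Set.ofList (xs ++ ys) = PySem.Set.update (PySem.Set.ofList xs) ys := by
  simp [PySem.Set.ofList_eq_foldl, PySem.Set.update, List.foldl_append]

-- B's closed form agrees with "rank in the distinct-prefix list" for every c ∈ l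
theorem pv_closed_form (l : List Char) (c : Char) (hc : c ∈ l) :
    ((PySem.Set.len (PySem.Set.ofList
        (PySem.List.slice l none
          (some ((((PySem.List.index? l c).getD 0 : Nat) : Int) + 1)))) : Int) - 1) =
      (((PySem.List.index? (PySem.Set.ofList l) c).getD 0 : Nat) : Int) := by
  obtain ⟨k, hk⟩ := Option.isSome_iff_exists.mp ((PySem.List.index?_isSome_iff l c).mpr hc)
  obtain ⟨pre, suf, hsplit, hlen, hpre⟩ := (PySem.List.index?_eq_some_iff l c k).mp hk
  have htake : l.take (k + 1) = pre ++ [c] := by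
    subst hsplit hlen
    rw [show pre.length + 1 = pre.length + 1 from rfl, List.take_append]
    simp
  have hcset : c ∉ PySem.Set.ofList pre := by
    simpa [PySem.Set.mem_ofList] using hpre
  have hofl : PySem.Set.ofList (pre ++ [c]) = PySem.Set.ofList pre ++ [c] := by
    rw [pv_ofList_append]
    simp [PySem.Set.update, PySem.Set.add, hcset]
  have hslice : PySem.List.slice l none
      (some ((((PySem.List.index? l c).getD 0 : Nat) : Int) + 1)) = pre ++ [c] := by
    rw [hk]
    have : (((k : Nat) : Int)) + 1 = (((k + 1 : Nat)) : Int) := by push_cast; ring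
    simp only [Option.getD_some, this, PySem.List.slice_to_natCast]
    exact htake
  have hidx : PySem.List.index? (PySem.Set.ofList l) c = some (PySem.Set.ofList pre).length := by
    have : PySem.Set.ofList l = PySem.Set.update (PySem.Set.ofList (pre ++ [c])) suf := by
      rw [hsplit, show pre ++ c :: suf = (pre ++ [c]) ++ suf by simp, pv_ofList_append]
    rw [this, pv_index?_update_of_mem _ (by rw [hofl]; simp), hofl,
        PySem.List.index?_append_singleton_self _ _ hcset]
  rw [hslice, hofl, hidx]
  simp [PySem.Set.len]

-- ===== VERDICT (by name: the statement is the Claim_ definition above) =====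
theorem get_canonical_spec : Claim_equal_get_canonical := by
  intro word _
  show get_canonical word = get_canonical_alt word
  unfold get_canonical get_canonical_alt
  have h := pv_loop word.toList PySem.Dict.empty [] []
    (fun c => by simp [PySem.Dict.contains_empty])
    (fun c => by simp [PySem.Dict.getD_empty])
  simp only [List.length_nil, Nat.cast_zero] at h
  rw [h]
  simp only [List.nil_append]
  refine (List.map_congr_left ?_).symm
  intro c hc
  rw [pv_closed_form word.toList c hc]
  rfl
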